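-- pv_equiv track=rewrite | github.com/msft-mirror-aosp/platform.external.toolchain-utils | rust_tools/auto_upload_rust_bootstrap.py | find_raw_bootstrap_sequence_lines
-- ===== SOURCE A (Python) =====
-- from typing import Dict, List, Optional, Tuple, Union
--
-- def find_raw_bootstrap_sequence_lines(
--     ebuild_lines: List[str],
-- ) -> Tuple[int, int]:
--     """Returns the start/end lines of RUSTC_RAW_FULL_BOOTSTRAP_SEQUENCE."""
--     for i, line in enumerate(ebuild_lines):
--         if line.startswith("RUSTC_RAW_FULL_BOOTSTRAP_SEQUENCE=("):
--             start = i
--             break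
--     else:
--         raise ValueError("No bootstrap sequence start found in text")
--
--     for i, line in enumerate(ebuild_lines[i + 1 :], i + 1):
--         if line.rstrip() == ")":
--             return start, i
--     raise ValueError("No bootstrap sequence end found in text")
-- ===== SOURCE B (Python) =====
-- def find_raw_bootstrap_sequence_lines(ebuild_lines):
--     """Returns the start/end lines of RUSTC_RAW_FULL_BOOTSTRAP_SEQUENCE."""
--     marker = "RUSTC_RAW_FULL_BOOTSTRAP_SEQUENCE=("
--     starts = [i for i, line in enumerate(ebuild_lines) if line.startswith(marker)]
--     closers = [i for i, line in enumerate(ebuild_lines) if line.rstrip() == ")"]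
--     if not starts:
--         raise ValueError("No bootstrap sequence start found in text")
--     start = starts[0]
--     for c in closers:
--         if c > start:
--             return start, c
--     raise ValueError("No bootstrap sequence end found in text")
-- ===== Notes on version B (the rewrite author's own statement) =====
-- stated objective: alternative
-- what changed: Instead of A's two staged scans with early break (find-start loop, then a second enumerate over a slice), B first builds the full index lists of marker lines and of ')' lines by comprehensions over the whole input, then selects the first start and the first closer strictly after it.
import Mathlib
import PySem

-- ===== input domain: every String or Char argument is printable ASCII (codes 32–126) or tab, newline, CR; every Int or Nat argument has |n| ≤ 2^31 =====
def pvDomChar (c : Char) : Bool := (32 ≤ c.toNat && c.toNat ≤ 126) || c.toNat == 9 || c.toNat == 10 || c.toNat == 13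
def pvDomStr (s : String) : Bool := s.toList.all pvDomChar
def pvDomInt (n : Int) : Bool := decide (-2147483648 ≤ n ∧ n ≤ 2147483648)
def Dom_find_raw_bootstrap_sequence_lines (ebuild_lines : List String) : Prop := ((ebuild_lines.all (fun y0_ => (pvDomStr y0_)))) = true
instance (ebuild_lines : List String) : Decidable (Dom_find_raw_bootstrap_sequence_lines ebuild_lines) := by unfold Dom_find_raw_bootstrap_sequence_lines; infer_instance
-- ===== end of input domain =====

-- B builds the complete index lists of marker lines and of ")" lines first, then selects
-- the first start and the first closer after it, instead of A's two staged break-loops;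
-- objective: alternative (same cost, different decomposition).


def pvMarker : String := "RUSTC_RAW_FULL_BOOTSTRAP_SEQUENCE=("

-- ===== PORT A =====
-- A's two enumerate loops with break: first index ≥ i whose line satisfies p
def pvFind (p : String → Bool) : List String → Nat → Option Nat
  | [], _ => none
  | l :: rest, i => if p l then some i else pvFind p rest (i + 1)

-- A raises ValueError where a loop finds nothing; the port returns (-1, -1) there (outside Pre_).
-- `ebuild_lines[i+1:]` is `List.drop (i+1)` (exact: the slice index i+1 is a nonnegative in-order index).
def find_raw_bootstrap_sequence_lines (ebuild_lines : List String) : Int × Int :=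
  match pvFind (fun l => PySem.Str.startswith l pvMarker) ebuild_lines 0 with
  | none => (-1, -1)
  | some start =>
    match pvFind (fun l => PySem.Str.rstrip l = ")") (ebuild_lines.drop (start + 1)) (start + 1) with
    | none => (-1, -1)
    | some i => ((start : Int), (i : Int))

-- ===== PORT B =====
-- comprehension [i for i, line in enumerate(lines) if p line]
def pvIdxs (p : String → Bool) : List String → Nat → List Nat
  | [], _ => []
  | l :: rest, i => if p l then i :: pvIdxs p rest (i + 1) else pvIdxs p rest (i + 1)

-- B's raising paths return (-1, -1) (outside Pre_)
def find_raw_bootstrap_sequence_lines_alt (ebuild_lines : List String) : Int × Int :=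
  let starts := pvIdxs (fun l => PySem.Str.startswith l pvMarker) ebuild_lines 0
  let closers := pvIdxs (fun l => PySem.Str.rstrip l = ")") ebuild_lines 0
  match starts with
  | [] => (-1, -1)
  | s :: _ =>
    match closers.find? (fun c => decide (s < c)) with
    | none => (-1, -1)
    | some e => ((s : Int), (e : Int))

-- ===== PRECONDITION & SPEC =====
-- Pre_ excludes exactly the inputs on which Python A raises ValueError (no marker line,
-- or no line rstripping to ")" after the first marker line).
def Pre_find_raw_bootstrap_sequence_lines (ebuild_lines : List String) : Prop :=
  (match ebuild_lines.findIdx? (fun l => PySem.Str.startswith l pvMarker) with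
   | none => false
   | some s => (ebuild_lines.drop (s + 1)).any (fun l => PySem.Str.rstrip l = ")")) = true

instance (ebuild_lines : List String) : Decidable (Pre_find_raw_bootstrap_sequence_lines ebuild_lines) := by
  unfold Pre_find_raw_bootstrap_sequence_lines; infer_instance

def pvWitness_find_raw_bootstrap_sequence_lines : List String :=
  ["RUSTC_RAW_FULL_BOOTSTRAP_SEQUENCE=(", "\t1.0.0", ")"]

def Spec_find_raw_bootstrap_sequence_lines (ebuild_lines : List String) (out : Int × Int) : Prop := out = find_raw_bootstrap_sequence_lines_alt ebuild_lines
instance (ebuild_lines : List String) (out : Int × Int) : Decidable (Spec_find_raw_bootstrap_sequence_lines ebuild_lines out) := by unfold Spec_find_raw_bootstrap_sequence_lines; infer_instance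

-- ===== CLAIM (what is proved, stated in full; the proofs are below) =====
def Claim_equal_find_raw_bootstrap_sequence_lines : Prop := ∀ (ebuild_lines : List String), Dom_find_raw_bootstrap_sequence_lines ebuild_lines → Pre_find_raw_bootstrap_sequence_lines ebuild_lines → Spec_find_raw_bootstrap_sequence_lines ebuild_lines (find_raw_bootstrap_sequence_lines ebuild_lines)

-- ===== LEMMAS AND PROOFS =====

-- the head of B's comprehension is exactly what A's break-loop finds
theorem pvIdxs_head (p : String → Bool) (lines : List String) (i : Nat) :
    (pvIdxs p lines i).head? = pvFind p lines i := by
  induction lines generalizing i with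
  | nil => simp [pvIdxs, pvFind]
  | cons l rest ih =>
    simp only [pvIdxs, pvFind]
    split
    · rfl
    · exact ih (i + 1)

-- past the threshold, every listed index qualifies, so find? is the head = A's loop
theorem pvIdxs_find_gt (p : String → Bool) (lines : List String) (s i : Nat) (h : s < i) :
    (pvIdxs p lines i).find? (fun c => decide (s < c)) = pvFind p lines i := by
  induction lines generalizing i with
  | nil => simp [pvIdxs, pvFind]
  | cons l rest ih =>
    simp only [pvIdxs, pvFind]
    split
    · simp [List.find?, h]
    · exact ih (i + 1) (by omega)

-- selecting the first closer after s from the full closers list is A's scan of the tail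
theorem pvIdxs_find_drop (p : String → Bool) (lines : List String) (s : Nat) :
    ∀ i, i ≤ s + 1 →
      (pvIdxs p lines i).find? (fun c => decide (s < c)) =
        pvFind p (lines.drop (s + 1 - i)) (s + 1) := by
  induction lines with
  | nil => intro i _; simp [pvIdxs, pvFind]
  | cons l rest ih =>
    intro i hi
    by_cases he : i = s + 1
    · subst he
      simp only [Nat.sub_self, List.drop_zero]
      exact pvIdxs_find_gt p (l :: rest) s (s + 1) (by omega)
    · have hle : i ≤ s := by omega
      have hd : (l :: rest).drop (s + 1 - i) = rest.drop (s + 1 - (i + 1)) := by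
        have h1 : s + 1 - i = (s + 1 - (i + 1)) + 1 := by omega
        simp [h1]
      rw [hd]
      simp only [pvIdxs]
      split
      · simp only [List.find?]
        rw [show (decide (s < i)) = false from decide_eq_false (by omega)]
        exact ih (i + 1) (by omega)
      · exact ih (i + 1) (by omega)

-- ===== VERDICT (by name: the statement is the Claim_ definition above) =====
theorem find_raw_bootstrap_sequence_lines_spec : Claim_equal_find_raw_bootstrap_sequence_lines := by
  intro lines _ _
  unfold Spec_find_raw_bootstrap_sequence_lines find_raw_bootstrap_sequence_lines
    find_raw_bootstrap_sequence_lines_alt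
  cases hfs : pvFind (fun l => PySem.Str.startswith l pvMarker) lines 0 with
  | none =>
    have := pvIdxs_head (fun l => PySem.Str.startswith l pvMarker) lines 0
    rw [hfs] at this
    cases hst : pvIdxs (fun l => PySem.Str.startswith l pvMarker) lines 0 with
    | nil => simp
    | cons a t => rw [hst] at this; simp at this
  | some s =>
    have := pvIdxs_head (fun l => PySem.Str.startswith l pvMarker) lines 0
    rw [hfs] at this
    cases hst : pvIdxs (fun l => PySem.Str.startswith l pvMarker) lines 0 with
    | nil => rw [hst] at this; simp at this
    | cons a t =>
      rw [hst] at this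
      simp only [List.head?] at this
      obtain rfl : a = s := by injection this
      simp only
      rw [pvIdxs_find_drop (fun l => PySem.Str.rstrip l = ")") lines a 0 (by omega)]
      simp
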